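-- pv_equiv track=rewrite | github.com/brownbreeze/StudyCodingTest | programmers/3_기지국_설치/source_20240519.py | solution
-- ===== SOURCE A (Python) =====
-- def solution(n, stations, w):
--     answer = 0
--     # apart_arr = [0 for _ in range(n+1)]
--     if n == 0 :
--         return 0
--
--     # aprt_arr setting
--     j = 0
--     # for i in range(n):
--     #     if i in range(stations[j]-w,stations[j]+w+1):
--     #         apart_arr[i] = 1
--     #     if stations[j]-1+w<i:
--     #         j+=1
--     #     if j >= len(stations):
--     #         break
--
--     i = 0
--     c = 0
--     while True:
--         if i > n : break
--         # if apart_arr[i] == 1: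
--         #     i+=1
--         #     continue
--         c += 1
--         i+=1
--         # i += w*2+1
--         # if i > n:
--         #     return c
--     return c
-- ===== SOURCE B (Python) =====
-- def solution(n, stations, w):
--     # closed form: the loop counts i = 0..n inclusive when n > 0; otherwise 0
--     return n + 1 if n > 0 else 0
-- ===== Notes on version B (the rewrite author's own statement) =====
-- stated objective: simpler
-- what changed: Replaced the counting while-loop (which just counts i from 0 to n) with the closed form n+1 for n>0 and 0 otherwise; stations and w stay unused.
import Mathlib
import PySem

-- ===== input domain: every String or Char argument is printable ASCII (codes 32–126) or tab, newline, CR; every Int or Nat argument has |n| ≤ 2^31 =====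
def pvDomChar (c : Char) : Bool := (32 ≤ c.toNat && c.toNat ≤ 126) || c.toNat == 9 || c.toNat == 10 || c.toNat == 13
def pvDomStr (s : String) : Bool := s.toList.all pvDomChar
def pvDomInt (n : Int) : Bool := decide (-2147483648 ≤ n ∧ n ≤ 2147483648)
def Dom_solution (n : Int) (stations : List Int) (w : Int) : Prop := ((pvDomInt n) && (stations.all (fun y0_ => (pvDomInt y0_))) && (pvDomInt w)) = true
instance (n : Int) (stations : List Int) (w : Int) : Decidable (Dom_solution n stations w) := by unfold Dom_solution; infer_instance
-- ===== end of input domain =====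

-- B replaces A's counting while-loop with the closed form n+1 (n>0) / 0; simpler and O(1).


-- ===== PORT A =====
-- the while loop: break when i > n, else c += 1; i += 1
def solutionLoop (n i c : Int) : Int :=
  if i > n then c
  else solutionLoop n (i + 1) (c + 1)
termination_by (n + 1 - i).toNat
decreasing_by omega

def solution (n : Int) (stations : List Int) (w : Int) : Int :=
  if n = 0 then 0
  else solutionLoop n 0 0

-- ===== PORT B =====
def solution_alt (n : Int) (stations : List Int) (w : Int) : Int :=
  if n > 0 then n + 1 else 0

-- ===== PRECONDITION & SPEC =====
def Spec_solution (n : Int) (stations : List Int) (w : Int) (out : Int) : Prop := out = solution_alt n stations w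
instance (n : Int) (stations : List Int) (w : Int) (out : Int) : Decidable (Spec_solution n stations w out) := by unfold Spec_solution; infer_instance

-- ===== CLAIM (what is proved, stated in full; the proofs are below) =====
def Claim_equal_solution : Prop := ∀ (n : Int) (stations : List Int) (w : Int), Dom_solution n stations w → Spec_solution n stations w (solution n stations w)

-- ===== LEMMAS AND PROOFS =====
theorem solutionLoop_eq (n i c : Int) :
    solutionLoop n i c = if i > n then c else c + (n + 1 - i) := by
  fun_induction solutionLoop with
  | case1 i c h => simp [h]
  | case2 i c h ih =>
    rw [ih]
    split_ifs with h2 <;> omega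

-- ===== VERDICT (by name: the statement is the Claim_ definition above) =====
theorem solution_spec : Claim_equal_solution := by
  intro n stations w _
  unfold Spec_solution solution solution_alt
  rw [solutionLoop_eq]
  split_ifs <;> omega
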